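-- pv_equiv track=rewrite | github.com/aaronwu901225main/tau-bench | scripts/translate_file_locale.py | _select_key
-- ===== SOURCE A (Python) =====
-- from typing import Any, Dict, Iterable, List
--
-- def _select_key(keys: List[str], usage: Dict[str, Any], day_key: str, limit: int, margin: int, tried: set[str]) -> str:
--     day_usage = usage.get(day_key, {})
--     candidates = [k for k in keys if k not in tried]
--     if not candidates:
--         candidates = keys[:]
--     candidates.sort(key=lambda k: int(day_usage.get(k, 0)))
--     for key in candidates:
--         if int(day_usage.get(key, 0)) < max(0, limit - margin):
--             return key
--     return candidates[0]
-- ===== SOURCE B (Python) =====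
-- def _select_key(keys, usage, day_key, limit, margin, tried):
--     # The sorted-then-threshold scan in A always ends up returning the first
--     # key of minimal daily usage, so a single running-best pass suffices.
--     day_usage = usage.get(day_key, {})
--     candidates = [k for k in keys if k not in tried]
--     if not candidates:
--         candidates = keys[:]
--     best = candidates[0]
--     best_usage = int(day_usage.get(best, 0))
--     for k in candidates[1:]:
--         u = int(day_usage.get(k, 0))
--         if u < best_usage:
--             best, best_usage = k, u
--     return best
-- ===== Notes on version B (the rewrite author's own statement) =====
-- stated objective: simpler
-- what changed: Replaces A's stable sort plus threshold scan (whose result is always the first key of minimal daily usage, making limit/margin irrelevant) by one running-best pass with strict '<' over the candidates.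
import Mathlib
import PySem

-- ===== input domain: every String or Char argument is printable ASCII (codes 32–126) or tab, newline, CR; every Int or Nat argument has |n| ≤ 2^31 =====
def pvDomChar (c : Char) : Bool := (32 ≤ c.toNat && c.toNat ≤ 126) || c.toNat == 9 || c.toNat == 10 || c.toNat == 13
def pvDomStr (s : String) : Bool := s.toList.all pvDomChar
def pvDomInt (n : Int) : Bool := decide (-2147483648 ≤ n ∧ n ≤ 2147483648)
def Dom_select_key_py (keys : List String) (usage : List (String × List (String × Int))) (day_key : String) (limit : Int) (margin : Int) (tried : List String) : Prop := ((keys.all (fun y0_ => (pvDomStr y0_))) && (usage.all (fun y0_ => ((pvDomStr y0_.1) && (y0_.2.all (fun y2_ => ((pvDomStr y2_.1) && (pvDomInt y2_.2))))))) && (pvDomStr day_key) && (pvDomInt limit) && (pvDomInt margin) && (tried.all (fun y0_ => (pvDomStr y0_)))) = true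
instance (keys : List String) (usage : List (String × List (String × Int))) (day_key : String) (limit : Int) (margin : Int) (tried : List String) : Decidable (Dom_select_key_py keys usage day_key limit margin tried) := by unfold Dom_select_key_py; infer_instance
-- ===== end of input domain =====

-- B replaces A's stable sort + threshold scan by a single running-best pass (simpler);
-- A's sorted-ascending scan always returns the first key of minimal daily usage, so limit/margin never matter.
-- Pre_ excludes keys = [], on which both Pythons raise IndexError (candidates[0] of an empty list).
-- shared helper: day_usage = usage.get(day_key, {}) as a dict for .get(k, 0) lookups
def pvDayUsage (usage : List (String × List (String × Int))) (day_key : String) : PySem.Dict String Int :=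
  PySem.Dict.mk (((PySem.Dict.mk usage).get? day_key).getD [])

-- ===== PORT A =====
def select_key_py (keys : List String) (usage : List (String × List (String × Int))) (day_key : String) (limit : Int) (margin : Int) (tried : List String) : String :=
  let day_usage := pvDayUsage usage day_key
  let candidates := keys.filter (fun k => !(tried.contains k))
  let candidates := if candidates = [] then keys else candidates
  let sortedC := PySem.List.sorted candidates (fun k => day_usage.getD k 0) false
  match sortedC.find? (fun key => decide (day_usage.getD key 0 < max 0 (limit - margin))) with
  | some key => key
  | none => (PySem.List.pyGet? sortedC 0).getD ""   -- candidates[0]; none only outside Pre_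

-- ===== PORT B =====
def select_key_py_alt (keys : List String) (usage : List (String × List (String × Int))) (day_key : String) (limit : Int) (margin : Int) (tried : List String) : String :=
  let day_usage := pvDayUsage usage day_key
  let candidates := keys.filter (fun k => !(tried.contains k))
  let candidates := if candidates = [] then keys else candidates
  match candidates with
  | [] => ""   -- Source B raises IndexError here (candidates[0]); outside Pre_
  | c :: rest =>
    (rest.foldl (fun (best : String × Int) k =>
        let u := day_usage.getD k 0
        if u < best.2 then (k, u) else best) (c, day_usage.getD c 0)).1

-- ===== PRECONDITION & SPEC =====
-- Pre_ excludes exactly keys = [], where A (and B) raise IndexError on candidates[0].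
def Pre_select_key_py (keys : List String) (usage : List (String × List (String × Int))) (day_key : String) (limit : Int) (margin : Int) (tried : List String) : Prop := keys ≠ []
instance (keys : List String) (usage : List (String × List (String × Int))) (day_key : String) (limit : Int) (margin : Int) (tried : List String) : Decidable (Pre_select_key_py keys usage day_key limit margin tried) := by unfold Pre_select_key_py; infer_instance
def pvWitness_select_key_py : List String × (List (String × List (String × Int))) × String × Int × Int × List String :=
  (["a", "b"], [("d", [("a", 2), ("b", 1)])], "d", 5, 1, ["a"])
def Spec_select_key_py (keys : List String) (usage : List (String × List (String × Int))) (day_key : String) (limit : Int) (margin : Int) (tried : List String) (out : String) : Prop := out = select_key_py_alt keys usage day_key limit margin tried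
instance (keys : List String) (usage : List (String × List (String × Int))) (day_key : String) (limit : Int) (margin : Int) (tried : List String) (out : String) : Decidable (Spec_select_key_py keys usage day_key limit margin tried out) := by unfold Spec_select_key_py; infer_instance

-- ===== CLAIM (what is proved, stated in full; the proofs are below) =====
def Claim_equal_select_key_py : Prop := ∀ (keys : List String) (usage : List (String × List (String × Int))) (day_key : String) (limit : Int) (margin : Int) (tried : List String), Dom_select_key_py keys usage day_key limit margin tried → Pre_select_key_py keys usage day_key limit margin tried → Spec_select_key_py keys usage day_key limit margin tried (select_key_py keys usage day_key limit margin tried)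

-- ===== LEMMAS AND PROOFS =====

-- ===== VERDICT (by name: the statement is the Claim_ definition above) =====
-- running-best step of B's fold
def pvStep (key : String → Int) (best : String × Int) (k : String) : String × Int :=
  if key k < best.2 then (k, key k) else best

-- head of the stable sort IS B's running-best fold (first minimal element)
theorem head_sorted_eq_fold (key : String → Int) (c : String) (rest : List String) :
    ∃ t, PySem.List.sorted (c :: rest) key false
        = (rest.foldl (pvStep key) (c, key c)).1 :: t
      ∧ (rest.foldl (pvStep key) (c, key c)).2
        = key (rest.foldl (pvStep key) (c, key c)).1 := by
  induction rest using List.reverseRecOn with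
  | nil =>
    exact ⟨[], by simp [PySem.List.sorted_eq_foldl_insertBy, PySem.List.insertBy], rfl⟩
  | append_singleton r x ih =>
    obtain ⟨t, hs, hk⟩ := ih
    have hsort : PySem.List.sorted (c :: (r ++ [x])) key false
        = PySem.List.insertBy (fun a b => decide (key a < key b)) x
            (PySem.List.sorted (c :: r) key false) := by
      rw [show c :: (r ++ [x]) = (c :: r) ++ [x] by simp,
          PySem.List.sorted_eq_foldl_insertBy, PySem.List.sorted_eq_foldl_insertBy,
          List.foldl_append]
      simp
    rw [hsort, hs]
    simp only [List.foldl_append, List.foldl_cons, List.foldl_nil]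
    set b := (r.foldl (pvStep key) (c, key c)) with hb
    by_cases h : key x < b.2
    · have h' : key x < key b.1 := hk ▸ h
      refine ⟨b.1 :: t, ?_, ?_⟩ <;> simp [PySem.List.insertBy, pvStep, h, h']
    · have h' : ¬ key x < key b.1 := hk ▸ h
      refine ⟨PySem.List.insertBy (fun a b => decide (key a < key b)) x t, ?_, ?_⟩ <;>
        simp [PySem.List.insertBy, pvStep, h', hk]

theorem select_key_py_spec : Claim_equal_select_key_py := by
  intro keys usage day_key limit margin tried _ hpre
  unfold Spec_select_key_py select_key_py select_key_py_alt
  dsimp only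
  set du := pvDayUsage usage day_key with hdu
  set cand0 := keys.filter (fun k => !(tried.contains k)) with hcand0
  set cand := if cand0 = [] then keys else cand0 with hcand
  have hne : cand ≠ [] := by
    rw [hcand]; split_ifs with h
    · exact hpre
    · exact h
  obtain ⟨c, rest, hc⟩ := List.exists_cons_of_ne_nil hne
  have hfold : (fun (best : String × Int) k =>
      let u := du.getD k 0
      if u < best.2 then (k, u) else best) = pvStep (fun k => du.getD k 0) := rfl
  rw [hc, hfold]
  obtain ⟨t, hs, hk⟩ := head_sorted_eq_fold (fun k => du.getD k 0) c rest
  set m := (rest.foldl (pvStep (fun k => du.getD k 0)) (c, du.getD c 0)).1 with hm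
  rw [hs]
  by_cases hlt : du.getD m 0 < max 0 (limit - margin)
  · simp only [List.find?, hlt, decide_true]
    exact hm
  · have hmin : ∀ y ∈ c :: rest, du.getD m 0 ≤ du.getD y 0 :=
      PySem.List.key_head_sorted_le _ _ hs
    have hnone : (m :: t).find?
        (fun key => decide (du.getD key 0 < max 0 (limit - margin))) = none := by
      rw [List.find?_eq_none]
      intro x hx
      have hx' : x ∈ c :: rest := (PySem.List.mem_sorted _ _ _ _).1 (hs ▸ hx)
      have := hmin x hx'
      simp only [decide_eq_true_eq]
      omega
    rw [hnone]
    simp [PySem.List.pyGet?, PySem.List.pyIdx?, hm]
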